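-- pv_equiv track=rewrite | github.com/edpaget/bot-showalter | src/fantasy_baseball_manager/services/opponent_model.py | _is_clustered
-- ===== SOURCE A (Python) =====
-- def _is_clustered(pick_numbers: list[int], half_round: int) -> bool:
--     """Check if any contiguous window of size half_round contains 2+ picks."""
--     if len(pick_numbers) < 2:
--         return False
--     sorted_picks = sorted(pick_numbers)
--     for i in range(len(sorted_picks)):
--         for j in range(i + 1, len(sorted_picks)):
--             if sorted_picks[j] - sorted_picks[i] < half_round:
--                 return True
--     return False
-- ===== SOURCE B (Python) =====
-- def _is_clustered(pick_numbers: list[int], half_round: int) -> bool: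
--     """Check if any two picks lie within half_round: after sorting, only adjacent gaps matter."""
--     s = sorted(pick_numbers)
--     return any(b - a < half_round for a, b in zip(s, s[1:]))
-- ===== Notes on version B (the rewrite author's own statement) =====
-- stated objective: alternative
-- what changed: Replaces the quadratic all-pairs scan after sorting with a single pass over adjacent sorted gaps (on a sorted list the minimum pairwise difference is an adjacent difference); worst-case cost drops to O(n log n) but both early-exit on clustered inputs, so no speed-up was measured.
import Mathlib
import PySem

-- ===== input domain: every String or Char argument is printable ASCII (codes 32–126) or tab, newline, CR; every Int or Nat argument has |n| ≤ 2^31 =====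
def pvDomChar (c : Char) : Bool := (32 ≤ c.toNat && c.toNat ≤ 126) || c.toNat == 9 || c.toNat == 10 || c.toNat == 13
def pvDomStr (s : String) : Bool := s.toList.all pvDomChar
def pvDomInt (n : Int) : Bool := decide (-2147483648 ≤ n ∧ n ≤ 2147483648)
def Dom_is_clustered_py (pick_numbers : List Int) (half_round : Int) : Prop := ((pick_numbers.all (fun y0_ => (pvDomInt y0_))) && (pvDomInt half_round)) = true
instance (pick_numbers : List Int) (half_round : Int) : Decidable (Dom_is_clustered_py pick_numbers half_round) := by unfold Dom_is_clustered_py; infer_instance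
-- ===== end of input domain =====

-- ===== PORT A =====
-- B replaces A's all-pairs scan after sorting with one pass over adjacent sorted gaps (alternative algorithm, same measured speed)
def is_clustered_py (pick_numbers : List Int) (half_round : Int) : Bool :=
  if pick_numbers.length < 2 then false
  else
    let sorted_picks := PySem.List.sorted pick_numbers (fun x => x) false
    (PySem.List.pyRange 0 (sorted_picks.length : Int) 1).any (fun i =>
      (PySem.List.pyRange (i + 1) (sorted_picks.length : Int) 1).any (fun j =>
        decide (PySem.List.pyGetD sorted_picks j 0 - PySem.List.pyGetD sorted_picks i 0 < half_round)))

-- ===== PORT B =====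
def is_clustered_py_alt (pick_numbers : List Int) (half_round : Int) : Bool :=
  let s := PySem.List.sorted pick_numbers (fun x => x) false
  (s.zip s.tail).any (fun p => decide (p.2 - p.1 < half_round))

-- ===== PRECONDITION & SPEC =====
def Spec_is_clustered_py (pick_numbers : List Int) (half_round : Int) (out : Bool) : Prop := out = is_clustered_py_alt pick_numbers half_round
instance (pick_numbers : List Int) (half_round : Int) (out : Bool) : Decidable (Spec_is_clustered_py pick_numbers half_round out) := by unfold Spec_is_clustered_py; infer_instance

-- ===== CLAIM (what is proved, stated in full; the proofs are below) =====
def Claim_equal_is_clustered_py : Prop := ∀ (pick_numbers : List Int) (half_round : Int), Dom_is_clustered_py pick_numbers half_round → Spec_is_clustered_py pick_numbers half_round (is_clustered_py pick_numbers half_round)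

-- ===== LEMMAS AND PROOFS =====

-- B's one-pass loop hits exactly the adjacent pairs of s
lemma alt_any_iff (s : List Int) (h : Int) :
    ((s.zip s.tail).any (fun p => decide (p.2 - p.1 < h)) = true) ↔
      ∃ k : Nat, k + 1 < s.length ∧ s.getD (k + 1) 0 - s.getD k 0 < h := by
  rw [List.any_eq_true]
  constructor
  · rintro ⟨⟨x, y⟩, hmem, hp⟩
    obtain ⟨k, hk, heq⟩ := List.mem_iff_getElem.mp hmem
    have hlen : k + 1 < s.length := by
      simp [List.length_zip, List.length_tail] at hk; omega
    refine ⟨k, hlen, ?_⟩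
    have h1 : (s.zip s.tail)[k] = (s[k]'(by omega), s.tail[k]'(by simp [List.length_tail]; omega)) :=
      List.getElem_zip
    have h2 : s.tail[k]'(by simp [List.length_tail]; omega) = s[k + 1]'hlen := by
      simp [List.getElem_tail]
    rw [h1, h2] at heq
    injection heq with e1 e2
    simp only [decide_eq_true_eq] at hp
    rw [List.getD_eq_getElem s 0 hlen, List.getD_eq_getElem s 0 (by omega : k < s.length)]
    rw [e1, e2]
    exact hp
  · rintro ⟨k, hk, hlt⟩
    refine ⟨(s[k]'(by omega), s[k + 1]'hk), ?_, ?_⟩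
    · refine List.mem_iff_getElem.mpr ⟨k, by simp [List.length_zip, List.length_tail]; omega, ?_⟩
      rw [List.getElem_zip]
      simp [List.getElem_tail]
    · simp only [decide_eq_true_eq]
      rw [List.getD_eq_getElem s 0 hk, List.getD_eq_getElem s 0 (by omega : k < s.length)] at hlt
      exact hlt

-- A's double loop is the all-pairs existential
lemma a_any_iff (s : List Int) (h : Int) :
    (((PySem.List.pyRange 0 (s.length : Int) 1).any (fun i =>
        (PySem.List.pyRange (i + 1) (s.length : Int) 1).any (fun j =>
          decide (PySem.List.pyGetD s j 0 - PySem.List.pyGetD s i 0 < h)))) = true) ↔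
      ∃ a b : Nat, a < b ∧ b < s.length ∧ s.getD b 0 - s.getD a 0 < h := by
  simp only [List.any_eq_true, PySem.List.mem_pyRange_one, decide_eq_true_eq]
  constructor
  · rintro ⟨i, ⟨hi0, hin⟩, j, ⟨hji, hjn⟩, hlt⟩
    refine ⟨i.toNat, j.toNat, by omega, by omega, ?_⟩
    rw [PySem.List.pyGetD_of_nonneg s (i := j) 0 (by omega), PySem.List.pyGetD_of_nonneg s (i := i) 0 hi0] at hlt
    exact hlt
  · rintro ⟨a, b, hab, hbn, hlt⟩
    refine ⟨(a : Int), ⟨by omega, by omega⟩, (b : Int), ⟨by omega, by omega⟩, ?_⟩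
    rw [PySem.List.pyGetD_of_nonneg s (i := (b : Int)) 0 (by omega), PySem.List.pyGetD_of_nonneg s (i := (a : Int)) 0 (by omega)]
    simpa using hlt

-- on a sorted list, some pair is close iff some ADJACENT pair is close
lemma pairs_iff_adjacent (s : List Int) (hs : s.Pairwise (· ≤ ·)) (h : Int) :
    (∃ a b : Nat, a < b ∧ b < s.length ∧ s.getD b 0 - s.getD a 0 < h) ↔
      ∃ k : Nat, k + 1 < s.length ∧ s.getD (k + 1) 0 - s.getD k 0 < h := by
  constructor
  · rintro ⟨a, b, hab, hbn, hlt⟩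
    refine ⟨a, by omega, ?_⟩
    have hmono : s[a + 1]'(by omega) ≤ s[b]'hbn := by
      rcases Nat.lt_or_ge (a + 1) b with hc | hc
      · exact (List.pairwise_iff_getElem.mp hs) (a + 1) b (by omega) hbn hc
      · have : a + 1 = b := by omega
        subst this; exact le_refl _
    rw [List.getD_eq_getElem s 0 hbn, List.getD_eq_getElem s 0 (by omega : a < s.length)] at hlt
    rw [List.getD_eq_getElem s 0 (by omega : a + 1 < s.length),
        List.getD_eq_getElem s 0 (by omega : a < s.length)]
    omega
  · rintro ⟨k, hk, hlt⟩
    exact ⟨k, k + 1, by omega, hk, hlt⟩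

-- ===== VERDICT (by name: the statement is the Claim_ definition above) =====
theorem is_clustered_py_spec : Claim_equal_is_clustered_py := by
  intro pick_numbers half_round _hdom
  unfold Spec_is_clustered_py is_clustered_py is_clustered_py_alt
  set s := PySem.List.sorted pick_numbers (fun x => x) false with hsdef
  have hlen : s.length = pick_numbers.length := PySem.List.length_sorted ..
  have hpw : s.Pairwise (· ≤ ·) := PySem.List.sorted_pairwise ..
  by_cases hsmall : pick_numbers.length < 2
  · simp only [if_pos hsmall]
    cases hB : (s.zip s.tail).any (fun p => decide (p.2 - p.1 < half_round)) with
    | false => rfl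
    | true =>
      obtain ⟨k, hk, -⟩ := (alt_any_iff s half_round).mp hB
      omega
  · simp only [if_neg hsmall]
    rw [Bool.eq_iff_iff, a_any_iff s half_round, alt_any_iff s half_round]
    exact pairs_iff_adjacent s hpw half_round
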